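-- pv_equiv track=rewrite | github.com/miliar/Code_Jam_Webscraper | solutions_python/Problem_117/464.py | can_mow
-- ===== SOURCE A (Python) =====
-- def flatten(l):
--     return [item for sublist in l for item in sublist]
--
-- def transpose(l):
--     return [[row[x] for row in l] for x in range(len(l[0]))]
--
-- def can_mow(lawn, pattern):
--     transposed_pattern = transpose(pattern)
--     max_height = max(flatten(pattern))
--
--     for height in range(max_height, -1, -1):
--         for y, row in enumerate(pattern):
--             if height in row and all([square <= height for square in row]): # confirm that the row needs mowing *and* can be mowed
--                 for x, square in enumerate(row):
--                     if lawn[y][x] > height: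
--                         lawn[y][x] = height
--         for x, col in enumerate(transposed_pattern):
--             if height in col and all([square <= height for square in col]): # confirm that the column needs mowing *and* can be mowed
--                 for y, square in enumerate(col):
--                     if lawn[y][x] > height:
--                         lawn[y][x] = height
--
--     return lawn == pattern
-- ===== SOURCE B (Python) =====
-- def _clip(v, m):
--     # the mower only has nonnegative height settings
--     return min(v, m) if m >= 0 else v
--
-- def can_mow(lawn, pattern):
--     # Return-value equivalent to A (A also mutates `lawn` in place; B does not).
--     rows, cols = len(pattern), len(pattern[0])
--     row_max = [max(r) for r in pattern]
--     col_max = [max(r[x] for r in pattern) for x in range(cols)]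
--     if len(lawn) != rows:
--         return False
--     for y in range(rows):
--         if len(lawn[y]) != len(pattern[y]):
--             return False
--         for x in range(cols):
--             if pattern[y][x] != _clip(_clip(lawn[y][x], row_max[y]), col_max[x]):
--                 return False
--     return True
-- ===== Notes on version B (the rewrite author's own statement) =====
-- stated objective: faster
-- what changed: B replaces A's simulation of mowing the lawn at every height from max(pattern) down to 0 (rescanning every row and column per height) by precomputing each row's and column's maximum once and checking per cell that pattern[y][x] equals lawn[y][x] clipped to the (nonnegative) row and column maxima, since a row/column is mowed exactly once, at its own maximum.
-- outside the precondition, e.g. on can_mow([[9], [9, 1]], [[1], [2, 3]]): A returns False, B returns True; on can_mow([[5, 5], [5]], [[1, -1], [-2, -3]]): A returns False, B returns False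
import Mathlib
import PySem

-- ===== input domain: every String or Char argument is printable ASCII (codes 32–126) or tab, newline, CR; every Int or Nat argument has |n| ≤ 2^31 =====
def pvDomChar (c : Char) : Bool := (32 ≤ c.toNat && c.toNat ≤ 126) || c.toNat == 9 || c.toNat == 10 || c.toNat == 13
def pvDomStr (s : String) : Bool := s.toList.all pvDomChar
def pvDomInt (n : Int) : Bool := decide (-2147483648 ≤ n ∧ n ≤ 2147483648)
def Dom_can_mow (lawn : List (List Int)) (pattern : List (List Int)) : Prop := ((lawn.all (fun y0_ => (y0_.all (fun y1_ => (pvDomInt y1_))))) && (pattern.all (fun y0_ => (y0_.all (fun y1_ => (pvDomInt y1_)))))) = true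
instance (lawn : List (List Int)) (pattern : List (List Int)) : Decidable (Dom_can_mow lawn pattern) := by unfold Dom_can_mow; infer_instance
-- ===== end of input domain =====

-- B replaces A's height-by-height mowing simulation by a single check of each pattern cell
-- against precomputed row/column maxima; equivalence is about the RETURN value only
-- (Python A also mutates `lawn` in place, B does not).

-- ===== PORT A =====
def pvFlatten (l : List (List Int)) : List Int := l.flatMap (fun sublist => sublist)

-- row[x] is in range under Pre_ (rectangular pattern), where `getD x 0` is exact
def pvTranspose (l : List (List Int)) : List (List Int) :=
  (List.range (l.headD []).length).map (fun x => l.map (fun row => row.getD x 0))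

-- `max(flatten(pattern))` raises on an empty pattern (excluded by Pre_); there
-- `(… ).getD 0` is never reached.  `lawn[y][x]` reads/writes are in range under Pre_,
-- where `getD`/`modify`/`set` are exact.
def can_mow (lawn : List (List Int)) (pattern : List (List Int)) : Bool :=
  let tp := pvTranspose pattern
  let mh := (PySem.List.max? (pvFlatten pattern) (fun v => v)).getD 0
  let final :=
    (PySem.List.pyRange mh (-1) (-1)).foldl (fun L h =>
      let L1 := pattern.zipIdx.foldl (fun L yr =>
        if yr.1.contains h && yr.1.all (fun sq => decide (sq ≤ h)) then
          yr.1.zipIdx.foldl (fun L xs =>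
            if (L.getD yr.2 []).getD xs.2 0 > h then L.modify yr.2 (fun r => r.set xs.2 h) else L) L
        else L) L
      tp.zipIdx.foldl (fun L xc =>
        if xc.1.contains h && xc.1.all (fun sq => decide (sq ≤ h)) then
          xc.1.zipIdx.foldl (fun L ys =>
            if (L.getD ys.2 []).getD xc.2 0 > h then L.modify ys.2 (fun r => r.set xc.2 h) else L) L
        else L) L1) lawn
  final == pattern

-- ===== PORT B =====
-- the mower only has nonnegative height settings
def pvClip (v m : Int) : Int := if m ≥ 0 then min v m else v

-- `max(r)` / `pattern[0]` raise on empty input (excluded by Pre_); the `.getD 0` defaults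
-- are never reached there, and `r.getD x 0` is exact for x < cols (rectangular pattern).
def can_mow_alt (lawn : List (List Int)) (pattern : List (List Int)) : Bool :=
  let rows := pattern.length
  let cols := (pattern.headD []).length
  let rowMax := pattern.map (fun r => (PySem.List.max? r (fun v => v)).getD 0)
  let colMax := (List.range cols).map (fun x =>
    (PySem.List.max? (pattern.map (fun r => r.getD x 0)) (fun v => v)).getD 0)
  if lawn.length ≠ rows then false
  else (List.range rows).all (fun y =>
    ((lawn.getD y []).length == (pattern.getD y []).length) &&
    (List.range cols).all (fun x =>
      (pattern.getD y []).getD x 0 ==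
        pvClip (pvClip ((lawn.getD y []).getD x 0) (rowMax.getD y 0)) (colMax.getD x 0)))

-- ===== PRECONDITION & SPEC =====
-- Pre_ restricts to the task's natural domain: a nonempty rectangular pattern, with the
-- lawn grid covering the pattern's shape unless the pattern is entirely negative (in which
-- case A mows nothing at all and no cell of the lawn is ever indexed).  Outside it A raises
-- (empty pattern, most ragged patterns, or a lawn too small for a cell the mowing passes
-- touch) or, on a ragged pattern whose first row is shortest, returns the result of
-- `transpose` silently truncating the columns.
def Pre_can_mow (lawn : List (List Int)) (pattern : List (List Int)) : Prop :=
  pattern ≠ [] ∧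
  0 < (pattern.headD []).length ∧
  (∀ row ∈ pattern, row.length = (pattern.headD []).length) ∧
  ((∀ row ∈ pattern, ∀ v ∈ row, v < 0) ∨
   (pattern.length ≤ lawn.length ∧
    (∀ y ∈ List.range pattern.length, (pattern.headD []).length ≤ (lawn.getD y []).length)))

instance (lawn : List (List Int)) (pattern : List (List Int)) : Decidable (Pre_can_mow lawn pattern) := by
  unfold Pre_can_mow; infer_instance

def pvWitness_can_mow : List (List Int) × List (List Int) := ([[3, 1], [2, 2]], [[2, 1], [2, 2]])

def Spec_can_mow (lawn : List (List Int)) (pattern : List (List Int)) (out : Bool) : Prop := out = can_mow_alt lawn pattern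
instance (lawn : List (List Int)) (pattern : List (List Int)) (out : Bool) : Decidable (Spec_can_mow lawn pattern out) := by unfold Spec_can_mow; infer_instance

-- ===== CLAIM (what is proved, stated in full; the proofs are below) =====
def Claim_equal_can_mow : Prop := ∀ (lawn : List (List Int)) (pattern : List (List Int)), Dom_can_mow lawn pattern → Pre_can_mow lawn pattern → Spec_can_mow lawn pattern (can_mow lawn pattern)

-- ===== LEMMAS AND PROOFS =====

-- the cell lawn[y][x] (0 outside the grid; all accesses below are in range)
def gcell (L : List (List Int)) (y x : Nat) : Int := (L.getD y []).getD x 0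

-- one mowing touch: `if lawn[y][x] > h: lawn[y][x] = h`
def pvTouch (h : Int) (y x : Nat) (L : List (List Int)) : List (List Int) :=
  if (L.getD y []).getD x 0 > h then L.modify y (fun r => r.set x h) else L

def rmaxP (pattern : List (List Int)) (y : Nat) : Int :=
  (PySem.List.max? (pattern.getD y []) (fun v => v)).getD 0

def colListP (pattern : List (List Int)) (x : Nat) : List Int := pattern.map (fun r => r.getD x 0)

def cmaxP (pattern : List (List Int)) (x : Nat) : Int :=
  (PySem.List.max? (colListP pattern x) (fun v => v)).getD 0

def pvGuard (h : Int) (l : List Int) : Bool := l.contains h && l.all (fun sq => decide (sq ≤ h))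

-- the body of A's heights loop (row phase then column phase), named for the proofs
def pvStep (pattern : List (List Int)) (h : Int) (L : List (List Int)) : List (List Int) :=
  let tp := pvTranspose pattern
  let L1 := pattern.zipIdx.foldl (fun L yr =>
    if yr.1.contains h && yr.1.all (fun sq => decide (sq ≤ h)) then
      yr.1.zipIdx.foldl (fun L xs =>
        if (L.getD yr.2 []).getD xs.2 0 > h then L.modify yr.2 (fun r => r.set xs.2 h) else L) L
    else L) L
  tp.zipIdx.foldl (fun L xc =>
    if xc.1.contains h && xc.1.all (fun sq => decide (sq ≤ h)) then
      xc.1.zipIdx.foldl (fun L ys =>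
        if (L.getD ys.2 []).getD xc.2 0 > h then L.modify ys.2 (fun r => r.set xc.2 h) else L) L
    else L) L1

lemma getD_modify_row (L : List (List Int)) (y y' : Nat) (f : List Int → List Int)
    (hy : y < L.length) :
    (L.modify y f).getD y' [] = if y' = y then f (L.getD y []) else L.getD y' [] := by
  by_cases hy' : y' < L.length
  · have h2 : y' < (L.modify y f).length := by simpa using hy'
    rw [List.getD_eq_getElem _ _ h2, List.getElem_modify]
    rcases eq_or_ne y' y with rfl | e
    · rw [if_pos rfl, if_pos rfl, List.getD_eq_getElem _ _ hy']
    · rw [if_neg (fun h => e h.symm), if_neg e, List.getD_eq_getElem _ _ hy']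
  · have e : y' ≠ y := fun h => hy' (h ▸ hy)
    rw [if_neg e, List.getD_eq_default _ _ (by simpa using Nat.le_of_not_lt hy'),
      List.getD_eq_default _ _ (Nat.le_of_not_lt hy')]

lemma getD_set_elem (r : List Int) (x : Nat) (a : Int) (hx : x < r.length) (x' : Nat) :
    (r.set x a).getD x' 0 = if x' = x then a else r.getD x' 0 := by
  by_cases hx' : x' < r.length
  · have h2 : x' < (r.set x a).length := by simpa using hx'
    rw [List.getD_eq_getElem _ _ h2, List.getElem_set]
    rcases eq_or_ne x' x with rfl | e
    · rw [if_pos rfl, if_pos rfl]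
    · rw [if_neg (fun h => e h.symm), if_neg e, List.getD_eq_getElem _ _ hx']
  · have e : x' ≠ x := fun h => hx' (h ▸ hx)
    rw [if_neg e, List.getD_eq_default _ _ (by simpa using Nat.le_of_not_lt hx'),
      List.getD_eq_default _ _ (Nat.le_of_not_lt hx')]

lemma length_touch (h : Int) (y x : Nat) (L : List (List Int)) :
    (pvTouch h y x L).length = L.length := by
  unfold pvTouch; split <;> simp

lemma rowlen_touch (h : Int) (y x : Nat) (L : List (List Int)) (y' : Nat) :
    ((pvTouch h y x L).getD y' []).length = (L.getD y' []).length := by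
  unfold pvTouch
  split
  · by_cases hy : y < L.length
    · rw [getD_modify_row L y y' _ hy]
      split
      · next e => subst e; simp
      · rfl
    · have hid : L.modify y (fun r => r.set x h) = L := by
        apply List.ext_getElem (by simp)
        intro n h1 h2
        rw [List.getElem_modify, if_neg (by omega)]
      rw [hid]
  · rfl

lemma gcell_touch (h : Int) (y x : Nat) (L : List (List Int))
    (hy : y < L.length) (hx : x < (L.getD y []).length) (y' x' : Nat) :
    gcell (pvTouch h y x L) y' x' =
      if y' = y ∧ x' = x then min (gcell L y' x') h else gcell L y' x' := by
  unfold pvTouch gcell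
  by_cases hgt : (L.getD y []).getD x 0 > h
  · rw [if_pos hgt, getD_modify_row L y y' _ hy]
    rcases eq_or_ne y' y with rfl | e
    · rw [if_pos rfl, getD_set_elem _ _ _ hx]
      rcases eq_or_ne x' x with rfl | e2
      · simp only [and_self, if_pos]
        omega
      · rw [if_neg e2, if_neg (by simp [e2])]
    · rw [if_neg e, if_neg (by simp [e])]
  · rw [if_neg hgt]
    split
    · next hc => obtain ⟨rfl, rfl⟩ := hc; omega
    · rfl

lemma gcell_foldl_touch (h : Int) :
    ∀ (ps : List (Nat × Nat)) (L : List (List Int)),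
      (∀ p ∈ ps, p.1 < L.length ∧ p.2 < (L.getD p.1 []).length) →
      (ps.foldl (fun L p => pvTouch h p.1 p.2 L) L).length = L.length ∧
      (∀ y', ((ps.foldl (fun L p => pvTouch h p.1 p.2 L) L).getD y' []).length = (L.getD y' []).length) ∧
      (∀ y' x', gcell (ps.foldl (fun L p => pvTouch h p.1 p.2 L) L) y' x' =
        if (y', x') ∈ ps then min (gcell L y' x') h else gcell L y' x') := by
  intro ps
  induction ps with
  | nil => intro L _; exact ⟨rfl, fun _ => rfl, fun y' x' => by simp⟩
  | cons p ps ih =>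
    intro L hps
    have hp := hps p (List.mem_cons_self ..)
    have hps' : ∀ q ∈ ps, q.1 < (pvTouch h p.1 p.2 L).length ∧
        q.2 < ((pvTouch h p.1 p.2 L).getD q.1 []).length := by
      intro q hq
      rw [length_touch, rowlen_touch]
      exact hps q (List.mem_cons_of_mem _ hq)
    obtain ⟨ih1, ih2, ih3⟩ := ih (pvTouch h p.1 p.2 L) hps'
    simp only [List.foldl_cons]
    refine ⟨by rw [ih1, length_touch], fun y' => by rw [ih2, rowlen_touch], fun y' x' => ?_⟩
    rw [ih3, gcell_touch h p.1 p.2 L hp.1 hp.2]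
    have hmem : ((y', x') ∈ p :: ps) ↔ ((y' = p.1 ∧ x' = p.2) ∨ (y', x') ∈ ps) := by
      simp [List.mem_cons, Prod.ext_iff]
    by_cases hin : (y', x') ∈ ps <;> by_cases he : y' = p.1 ∧ x' = p.2 <;>
      simp [hmem, hin, he] <;> omega

lemma foldl_zipIdx_getD {α β : Type} (d : α) :
    ∀ (l : List α) (n : Nat) (F : β → α × Nat → β) (init : β),
      (l.zipIdx n).foldl F init
        = (List.range l.length).foldl (fun b k => F b (l.getD k d, n + k)) init := by
  intro l
  induction l with
  | nil => intro n F init; rfl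
  | cons a t ih =>
    intro n F init
    rw [List.zipIdx_cons, List.foldl_cons, ih (n + 1)]
    simp only [List.length_cons, List.range_succ_eq_map, List.foldl_cons, List.foldl_map]
    have h0 : F init (a, n) = F init ((a :: t).getD 0 d, n + 0) := by simp
    rw [h0]
    apply PySem.List.foldl_congr_mem
    intro acc k _
    have e : n + 1 + k = n + (k + 1) := by omega
    simp [e, Nat.succ_eq_add_one]

-- `height in row and all(square <= height for square in row)` says exactly `height = max(row)`
lemma guard_iff_max (h : Int) (l : List Int) (hne : l ≠ []) :
    pvGuard h l = true ↔ (PySem.List.max? l (fun v => v)).getD 0 = h := by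
  obtain ⟨m, hm⟩ : ∃ m, PySem.List.max? l (fun v => v) = some m := by
    rcases l with _ | ⟨a, t⟩
    · exact absurd rfl hne
    · exact ⟨t.foldl max a, PySem.List.max?_id_cons _ _⟩
  have hmem := PySem.List.max?_mem hm
  have hmax := PySem.List.max?_isMax hm
  rw [hm]
  simp only [Option.getD_some]
  unfold pvGuard
  rw [Bool.and_eq_true]
  constructor
  · rintro ⟨hc, ha⟩
    have h1 : h ∈ l := by simpa using hc
    have h2 : ∀ y ∈ l, y ≤ h := by simpa using ha
    have := hmax h h1
    have := h2 m hmem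
    omega
  · rintro rfl
    refine ⟨by simpa using hmem, by simpa using hmax⟩

lemma guarded_rows_spec (h : Int) (C : Nat) (g : Nat → Bool) :
    ∀ (ys : List Nat) (L : List (List Int)),
      (∀ k ∈ ys, k < L.length ∧ C ≤ (L.getD k []).length) →
      ((ys.foldl (fun L k => if g k then (List.range C).foldl (fun L i => pvTouch h k i L) L else L) L).length = L.length) ∧
      (∀ y', ((ys.foldl (fun L k => if g k then (List.range C).foldl (fun L i => pvTouch h k i L) L else L) L).getD y' []).length = (L.getD y' []).length) ∧
      (∀ y' x', gcell (ys.foldl (fun L k => if g k then (List.range C).foldl (fun L i => pvTouch h k i L) L else L) L) y' x' =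
        if y' ∈ ys ∧ g y' = true ∧ x' < C then min (gcell L y' x') h else gcell L y' x') := by
  intro ys
  induction ys with
  | nil => intro L _; exact ⟨rfl, fun _ => rfl, fun y' x' => by simp⟩
  | cons k ys ih =>
    intro L hys
    have hk := hys k (List.mem_cons_self ..)
    simp only [List.foldl_cons]
    cases hg : g k with
    | false =>
      rw [if_neg (by simp)]
      obtain ⟨ih1, ih2, ih3⟩ := ih L (fun q hq => hys q (List.mem_cons_of_mem _ hq))
      refine ⟨ih1, ih2, fun y' x' => ?_⟩
      rw [ih3]
      have hiff : (y' ∈ k :: ys ∧ g y' = true ∧ x' < C) ↔ (y' ∈ ys ∧ g y' = true ∧ x' < C) := by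
        constructor
        · rintro ⟨hmem, hgy, hx⟩
          rcases List.mem_cons.mp hmem with rfl | hmem'
          · simp [hg] at hgy
          · exact ⟨hmem', hgy, hx⟩
        · rintro ⟨hmem, hgy, hx⟩
          exact ⟨List.mem_cons_of_mem _ hmem, hgy, hx⟩
      simp only [hiff]
    | true =>
      rw [if_pos rfl]
      have hfold : (List.range C).foldl (fun L i => pvTouch h k i L) L
          = ((List.range C).map (fun i => (k, i))).foldl (fun L p => pvTouch h p.1 p.2 L) L := by
        rw [List.foldl_map]
      have hpairs : ∀ p ∈ (List.range C).map (fun i => (k, i)),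
          p.1 < L.length ∧ p.2 < (L.getD p.1 []).length := by
        intro p hp
        simp only [List.mem_map, List.mem_range] at hp
        obtain ⟨i, hi, rfl⟩ := hp
        exact ⟨hk.1, lt_of_lt_of_le hi hk.2⟩
      obtain ⟨t1, t2, t3⟩ := gcell_foldl_touch h _ L hpairs
      rw [hfold]
      set L1 := ((List.range C).map (fun i => (k, i))).foldl (fun L p => pvTouch h p.1 p.2 L) L with hL1
      obtain ⟨ih1, ih2, ih3⟩ := ih L1 (fun q hq => by
        rw [t1, t2]; exact hys q (List.mem_cons_of_mem _ hq))
      refine ⟨by rw [ih1, t1], fun y' => by rw [ih2, t2], fun y' x' => ?_⟩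
      rw [ih3, t3]
      have hmem : ((y', x') ∈ (List.range C).map (fun i => (k, i))) ↔ (y' = k ∧ x' < C) := by
        simp only [List.mem_map, List.mem_range, Prod.mk.injEq]
        constructor
        · rintro ⟨i, hi, rfl, rfl⟩; exact ⟨rfl, hi⟩
        · rintro ⟨rfl, h2⟩; exact ⟨x', h2, rfl, rfl⟩
      simp only [hmem, List.mem_cons]
      by_cases h1 : y' ∈ ys <;> by_cases h2 : g y' = true <;> by_cases h3 : x' < C <;>
        by_cases h4 : y' = k <;> simp [h1, h2, h3, h4, hg] <;> simp_all <;> omega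

lemma guarded_cols_spec (h : Int) (R : Nat) (g : Nat → Bool) :
    ∀ (xs : List Nat) (L : List (List Int)),
      (R ≤ L.length) →
      (∀ k ∈ xs, ∀ j, j < R → k < (L.getD j []).length) →
      ((xs.foldl (fun L k => if g k then (List.range R).foldl (fun L j => pvTouch h j k L) L else L) L).length = L.length) ∧
      (∀ y', ((xs.foldl (fun L k => if g k then (List.range R).foldl (fun L j => pvTouch h j k L) L else L) L).getD y' []).length = (L.getD y' []).length) ∧
      (∀ y' x', gcell (xs.foldl (fun L k => if g k then (List.range R).foldl (fun L j => pvTouch h j k L) L else L) L) y' x' =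
        if x' ∈ xs ∧ g x' = true ∧ y' < R then min (gcell L y' x') h else gcell L y' x') := by
  intro xs
  induction xs with
  | nil => intro L _ _; exact ⟨rfl, fun _ => rfl, fun y' x' => by simp⟩
  | cons k xs ih =>
    intro L hR hxs
    have hk := hxs k (List.mem_cons_self ..)
    simp only [List.foldl_cons]
    cases hg : g k with
    | false =>
      rw [if_neg (by simp)]
      obtain ⟨ih1, ih2, ih3⟩ := ih L hR (fun q hq => hxs q (List.mem_cons_of_mem _ hq))
      refine ⟨ih1, ih2, fun y' x' => ?_⟩
      rw [ih3]
      have hiff : (x' ∈ k :: xs ∧ g x' = true ∧ y' < R) ↔ (x' ∈ xs ∧ g x' = true ∧ y' < R) := by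
        constructor
        · rintro ⟨hmem, hgy, hx⟩
          rcases List.mem_cons.mp hmem with rfl | hmem'
          · simp [hg] at hgy
          · exact ⟨hmem', hgy, hx⟩
        · rintro ⟨hmem, hgy, hx⟩
          exact ⟨List.mem_cons_of_mem _ hmem, hgy, hx⟩
      simp only [hiff]
    | true =>
      rw [if_pos rfl]
      have hfold : (List.range R).foldl (fun L j => pvTouch h j k L) L
          = ((List.range R).map (fun j => (j, k))).foldl (fun L p => pvTouch h p.1 p.2 L) L := by
        rw [List.foldl_map]
      have hpairs : ∀ p ∈ (List.range R).map (fun j => (j, k)),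
          p.1 < L.length ∧ p.2 < (L.getD p.1 []).length := by
        intro p hp
        simp only [List.mem_map, List.mem_range] at hp
        obtain ⟨j, hj, rfl⟩ := hp
        exact ⟨lt_of_lt_of_le hj hR, hk j hj⟩
      obtain ⟨t1, t2, t3⟩ := gcell_foldl_touch h _ L hpairs
      rw [hfold]
      set L1 := ((List.range R).map (fun j => (j, k))).foldl (fun L p => pvTouch h p.1 p.2 L) L with hL1
      obtain ⟨ih1, ih2, ih3⟩ := ih L1 (by rw [t1]; exact hR) (fun q hq j hj => by
        rw [t2]; exact hxs q (List.mem_cons_of_mem _ hq) j hj)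
      refine ⟨by rw [ih1, t1], fun y' => by rw [ih2, t2], fun y' x' => ?_⟩
      rw [ih3, t3]
      have hmem : ((y', x') ∈ (List.range R).map (fun j => (j, k))) ↔ (x' = k ∧ y' < R) := by
        simp only [List.mem_map, List.mem_range, Prod.mk.injEq]
        constructor
        · rintro ⟨j, hj, rfl, rfl⟩; exact ⟨rfl, hj⟩
        · rintro ⟨rfl, h2⟩; exact ⟨y', h2, rfl, rfl⟩
      simp only [hmem, List.mem_cons]
      by_cases h1 : x' ∈ xs <;> by_cases h2 : g x' = true <;> by_cases h3 : y' < R <;>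
        by_cases h4 : x' = k <;> simp [h1, h2, h3, h4, hg] <;> simp_all <;> omega

lemma getD_mem_of_lt (pattern : List (List Int)) (k : Nat) (hk : k < pattern.length) :
    pattern.getD k [] ∈ pattern := by
  rw [List.getD_eq_getElem _ _ hk]
  exact List.getElem_mem hk

lemma step_spec (pattern : List (List Int)) (h : Int) (L : List (List Int))
    (hne : pattern ≠ []) (hC : 0 < (pattern.headD []).length)
    (hrect : ∀ row ∈ pattern, row.length = (pattern.headD []).length)
    (hlen : pattern.length ≤ L.length)
    (hrow : ∀ y, y < pattern.length → (pattern.headD []).length ≤ (L.getD y []).length) :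
    (pvStep pattern h L).length = L.length ∧
    (∀ y', ((pvStep pattern h L).getD y' []).length = (L.getD y' []).length) ∧
    (∀ y x, gcell (pvStep pattern h L) y x =
      if y < pattern.length ∧ x < (pattern.headD []).length then
        (if cmaxP pattern x = h then
          min (if rmaxP pattern y = h then min (gcell L y x) h else gcell L y x) h
         else (if rmaxP pattern y = h then min (gcell L y x) h else gcell L y x))
      else gcell L y x) := by
  -- canonical form of the row phase
  have hrowfold : ∀ (L0 : List (List Int)),
      pattern.zipIdx.foldl (fun L yr =>
        if yr.1.contains h && yr.1.all (fun sq => decide (sq ≤ h)) then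
          yr.1.zipIdx.foldl (fun L xs =>
            if (L.getD yr.2 []).getD xs.2 0 > h then L.modify yr.2 (fun r => r.set xs.2 h) else L) L
        else L) L0
      = (List.range pattern.length).foldl (fun L k =>
          if pvGuard h (pattern.getD k []) then
            (List.range (pattern.headD []).length).foldl (fun L i => pvTouch h k i L) L
          else L) L0 := by
    intro L0
    rw [foldl_zipIdx_getD ([] : List Int)]
    apply PySem.List.foldl_congr_mem
    intro acc k hk
    rw [List.mem_range] at hk
    have hlenk : (pattern.getD k []).length = (pattern.headD []).length :=
      hrect _ (getD_mem_of_lt pattern k hk)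
    simp only [Nat.zero_add]
    rw [show ((pattern.getD k []).contains h && (pattern.getD k []).all fun sq => decide (sq ≤ h))
        = pvGuard h (pattern.getD k []) from rfl]
    by_cases hgd : pvGuard h (pattern.getD k []) = true
    · rw [if_pos hgd, if_pos hgd, foldl_zipIdx_getD (0 : Int), hlenk]
      apply PySem.List.foldl_congr_mem
      intro acc2 i _
      simp only [Nat.zero_add]
      rfl
    · rw [if_neg hgd, if_neg hgd]
  -- canonical form of the column phase
  have htpget : ∀ k, k < (pattern.headD []).length →
      (pvTranspose pattern).getD k [] = colListP pattern k := by
    intro k hk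
    exact PySem.List.getD_map_range _ _ _ _ hk
  have hcolfold : ∀ (L0 : List (List Int)),
      (pvTranspose pattern).zipIdx.foldl (fun L xc =>
        if xc.1.contains h && xc.1.all (fun sq => decide (sq ≤ h)) then
          xc.1.zipIdx.foldl (fun L ys =>
            if (L.getD ys.2 []).getD xc.2 0 > h then L.modify ys.2 (fun r => r.set xc.2 h) else L) L
        else L) L0
      = (List.range (pattern.headD []).length).foldl (fun L k =>
          if pvGuard h (colListP pattern k) then
            (List.range pattern.length).foldl (fun L j => pvTouch h j k L) L
          else L) L0 := by
    intro L0
    rw [foldl_zipIdx_getD ([] : List Int)]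
    have htplen : (pvTranspose pattern).length = (pattern.headD []).length := by
      simp [pvTranspose]
    rw [htplen]
    apply PySem.List.foldl_congr_mem
    intro acc k hk
    rw [List.mem_range] at hk
    rw [htpget k hk]
    have hclen : (colListP pattern k).length = pattern.length := by simp [colListP]
    simp only [Nat.zero_add]
    rw [show ((colListP pattern k).contains h && (colListP pattern k).all fun sq => decide (sq ≤ h))
        = pvGuard h (colListP pattern k) from rfl]
    by_cases hgd : pvGuard h (colListP pattern k) = true
    · rw [if_pos hgd, if_pos hgd, foldl_zipIdx_getD (0 : Int), hclen]
      apply PySem.List.foldl_congr_mem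
      intro acc2 i _
      simp only [Nat.zero_add]
      rfl
    · rw [if_neg hgd, if_neg hgd]
  have hstep : pvStep pattern h L
      = (List.range (pattern.headD []).length).foldl (fun L k =>
          if pvGuard h (colListP pattern k) then
            (List.range pattern.length).foldl (fun L j => pvTouch h j k L) L
          else L)
        ((List.range pattern.length).foldl (fun L k =>
          if pvGuard h (pattern.getD k []) then
            (List.range (pattern.headD []).length).foldl (fun L i => pvTouch h k i L) L
          else L) L) := by
    show (pvTranspose pattern).zipIdx.foldl _
        (pattern.zipIdx.foldl _ L) = _
    rw [hrowfold, hcolfold]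
  obtain ⟨r1, r2, r3⟩ := guarded_rows_spec h (pattern.headD []).length
    (fun k => pvGuard h (pattern.getD k [])) (List.range pattern.length) L
    (fun k hk => ⟨lt_of_lt_of_le (List.mem_range.mp hk) hlen, hrow k (List.mem_range.mp hk)⟩)
  set L1 := (List.range pattern.length).foldl (fun L k =>
    if pvGuard h (pattern.getD k []) then
      (List.range (pattern.headD []).length).foldl (fun L i => pvTouch h k i L) L
    else L) L with hL1def
  obtain ⟨c1, c2, c3⟩ := guarded_cols_spec h pattern.length
    (fun k => pvGuard h (colListP pattern k)) (List.range (pattern.headD []).length) L1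
    (by rw [r1]; exact hlen)
    (fun k hk j hj => by
      rw [r2]
      exact lt_of_lt_of_le (List.mem_range.mp hk) (hrow j hj))
  rw [hstep]
  refine ⟨by rw [c1, r1], fun y' => by rw [c2, r2], fun y x => ?_⟩
  rw [c3, r3]
  rcases Decidable.em (y < pattern.length ∧ x < (pattern.headD []).length) with hyx | hyx
  · obtain ⟨hy, hx⟩ := hyx
    have hgr : (pvGuard h (pattern.getD y []) = true) ↔ rmaxP pattern y = h := by
      have hlenr : (pattern.getD y []).length = (pattern.headD []).length :=
        hrect _ (getD_mem_of_lt pattern y hy)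
      refine guard_iff_max h _ ?_
      intro e
      rw [e] at hlenr
      simp only [List.length_nil] at hlenr
      omega
    have hgc : (pvGuard h (colListP pattern x) = true) ↔ cmaxP pattern x = h := by
      have hlenc : (colListP pattern x).length = pattern.length := by simp [colListP]
      refine guard_iff_max h _ ?_
      intro e
      rw [e] at hlenc
      simp only [List.length_nil] at hlenc
      omega
    have e1 : (x ∈ List.range (pattern.headD []).length ∧ pvGuard h (colListP pattern x) = true ∧
        y < pattern.length) ↔ cmaxP pattern x = h := by
      constructor
      · rintro ⟨-, hgg, -⟩; exact hgc.mp hgg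
      · intro e; exact ⟨List.mem_range.mpr hx, hgc.mpr e, hy⟩
    have e2 : (y ∈ List.range pattern.length ∧ pvGuard h (pattern.getD y []) = true ∧
        x < (pattern.headD []).length) ↔ rmaxP pattern y = h := by
      constructor
      · rintro ⟨-, hgg, -⟩; exact hgr.mp hgg
      · intro e; exact ⟨List.mem_range.mpr hy, hgr.mpr e, hx⟩
    simp only [e1, e2]
    rw [if_pos (show y < pattern.length ∧ x < (pattern.headD []).length from ⟨hy, hx⟩)]
  · have e1 : ¬(x ∈ List.range (pattern.headD []).length ∧ pvGuard h (colListP pattern x) = true ∧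
        y < pattern.length) := by
      rintro ⟨a, -, c⟩
      rw [List.mem_range] at a
      exact hyx ⟨c, a⟩
    have e2 : ¬(y ∈ List.range pattern.length ∧ pvGuard h (pattern.getD y []) = true ∧
        x < (pattern.headD []).length) := by
      rintro ⟨a, -, c⟩
      rw [List.mem_range] at a
      exact hyx ⟨a, c⟩
    rw [if_neg e1, if_neg e2, if_neg hyx]

lemma pyRange_down_succ (n : Nat) :
    PySem.List.pyRange (n : Int) (-1) (-1) = (n : Int) :: PySem.List.pyRange ((n : Int) - 1) (-1) (-1) := by
  cases n with
  | zero => decide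
  | succ m =>
    have h3 : (-1 : Int) < ((m + 1 : Nat) : Int) := by push_cast; omega
    have h4 : (-1 : Int) < ((m + 1 : Nat) : Int) - 1 := by push_cast; omega
    simp only [PySem.List.pyRange, if_neg (by norm_num : ¬(-1 : Int) = 0),
      if_neg (by norm_num : ¬(0 : Int) < -1), if_pos h3, if_pos h4, neg_neg]
    have c1 : ((((m + 1 : Nat) : Int) - (-1) + 1 - 1) / 1).toNat = m + 2 := by
      rw [Int.ediv_one]; omega
    have c2 : ((((m + 1 : Nat) : Int) - 1 - (-1) + 1 - 1) / 1).toNat = m + 1 := by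
      rw [Int.ediv_one]; omega
    rw [c1, c2]
    apply List.ext_getElem
    · simp
    · intro i hi1 hi2
      rcases i with _ | j
      · simp only [List.getElem_map, List.getElem_range, List.getElem_cons_zero]
        push_cast; ring
      · simp only [List.getElem_map, List.getElem_range, List.getElem_cons_succ]
        push_cast; ring

lemma pyRange_down_empty (M : Int) (h : M < 0) :
    PySem.List.pyRange M (-1) (-1) = [] := by
  simp only [PySem.List.pyRange, if_neg (by norm_num : ¬(-1 : Int) = 0),
    if_neg (by norm_num : ¬(0 : Int) < -1), if_neg (show ¬(-1 : Int) < M by omega)]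
  rfl

lemma mem_flatten_of_mem_row (pattern : List (List Int)) (r : List Int) (v : Int)
    (hr : r ∈ pattern) (hv : v ∈ r) : v ∈ pvFlatten pattern := by
  simp only [pvFlatten, List.mem_flatMap]
  exact ⟨r, hr, hv⟩

lemma rmax_le_M (pattern : List (List Int)) (M : Int)
    (hM : PySem.List.max? (pvFlatten pattern) (fun v => v) = some M)
    (hC : 0 < (pattern.headD []).length)
    (hrect : ∀ row ∈ pattern, row.length = (pattern.headD []).length)
    (y : Nat) (hy : y < pattern.length) : rmaxP pattern y ≤ M := by
  have hmem := getD_mem_of_lt pattern y hy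
  have hlenr : (pattern.getD y []).length = (pattern.headD []).length := hrect _ hmem
  rcases hrow : pattern.getD y [] with _ | ⟨a, t⟩
  · rw [hrow] at hlenr
    simp only [List.length_nil] at hlenr
    omega
  · have hm : PySem.List.max? (pattern.getD y []) (fun v => v) = some (t.foldl max a) := by
      rw [hrow]; exact PySem.List.max?_id_cons _ _
    have hmm := PySem.List.max?_mem hm
    rw [rmaxP, hm]
    exact PySem.List.max?_isMax hM _ (mem_flatten_of_mem_row pattern _ _ hmem hmm)

lemma cmax_le_M (pattern : List (List Int)) (M : Int)
    (hM : PySem.List.max? (pvFlatten pattern) (fun v => v) = some M)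
    (hne : pattern ≠ []) (hC : 0 < (pattern.headD []).length)
    (hrect : ∀ row ∈ pattern, row.length = (pattern.headD []).length)
    (x : Nat) (hx : x < (pattern.headD []).length) : cmaxP pattern x ≤ M := by
  have hRpos : 0 < pattern.length := List.length_pos_of_ne_nil hne
  rcases hcol : colListP pattern x with _ | ⟨a, t⟩
  · have hlc := congrArg List.length hcol
    simp only [colListP, List.length_map, List.length_nil] at hlc
    omega
  · have hm : PySem.List.max? (colListP pattern x) (fun v => v) = some (t.foldl max a) := by
      rw [hcol]; exact PySem.List.max?_id_cons _ _
    have hmem := PySem.List.max?_mem hm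
    rw [cmaxP, hm]
    simp only [colListP, List.mem_map] at hmem
    obtain ⟨r, hr, hrq⟩ := hmem
    have hxr : x < r.length := by rw [hrect r hr]; exact hx
    simp only [Option.getD_some]
    rw [← hrq]
    apply PySem.List.max?_isMax hM
    apply mem_flatten_of_mem_row pattern r _ hr
    rw [List.getD_eq_getElem _ _ hxr]
    exact List.getElem_mem hxr

lemma heights_spec (pattern : List (List Int))
    (hne : pattern ≠ []) (hC : 0 < (pattern.headD []).length)
    (hrect : ∀ row ∈ pattern, row.length = (pattern.headD []).length) :
    ∀ (n : Nat) (L : List (List Int)),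
      pattern.length ≤ L.length →
      (∀ y, y < pattern.length → (pattern.headD []).length ≤ (L.getD y []).length) →
      ((PySem.List.pyRange ((n : Int) - 1) (-1) (-1)).foldl (fun L h => pvStep pattern h L) L).length = L.length ∧
      (∀ y', (((PySem.List.pyRange ((n : Int) - 1) (-1) (-1)).foldl (fun L h => pvStep pattern h L) L).getD y' []).length = (L.getD y' []).length) ∧
      (∀ y x, y < pattern.length → x < (pattern.headD []).length →
        gcell ((PySem.List.pyRange ((n : Int) - 1) (-1) (-1)).foldl (fun L h => pvStep pattern h L) L) y x =
          (if 0 ≤ cmaxP pattern x ∧ cmaxP pattern x ≤ (n : Int) - 1 then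
            min (if 0 ≤ rmaxP pattern y ∧ rmaxP pattern y ≤ (n : Int) - 1 then min (gcell L y x) (rmaxP pattern y) else gcell L y x) (cmaxP pattern x)
           else (if 0 ≤ rmaxP pattern y ∧ rmaxP pattern y ≤ (n : Int) - 1 then min (gcell L y x) (rmaxP pattern y) else gcell L y x))) := by
  intro n
  induction n with
  | zero =>
    intro L h1 h2
    have hempty : PySem.List.pyRange (((0 : Nat) : Int) - 1) (-1) (-1) = [] := by decide
    rw [hempty]
    refine ⟨rfl, fun _ => rfl, fun y x hy hx => ?_⟩
    simp only [List.foldl_nil]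
    rw [if_neg (by push_cast; omega), if_neg (by push_cast; omega)]
  | succ n ihn =>
    intro L h1 h2
    have hcast : (((n + 1 : Nat)) : Int) - 1 = ((n : Nat) : Int) := by push_cast; ring
    rw [hcast, pyRange_down_succ n, List.foldl_cons]
    obtain ⟨s1, s2, s3⟩ := step_spec pattern ((n : Nat) : Int) L hne hC hrect h1 h2
    obtain ⟨i1, i2, i3⟩ := ihn (pvStep pattern ((n : Nat) : Int) L)
      (by rw [s1]; exact h1) (fun y hy => by rw [s2]; exact h2 y hy)
    refine ⟨by rw [i1, s1], fun y' => by rw [i2, s2], fun y x hy hx => ?_⟩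
    rw [i3 y x hy hx]
    rw [s3 y x]
    rw [if_pos (show y < pattern.length ∧ x < (pattern.headD []).length from ⟨hy, hx⟩)]
    split_ifs <;> omega

lemma balt_iff (lawn : List (List Int)) (pattern : List (List Int)) :
    can_mow_alt lawn pattern = true ↔
      (lawn.length = pattern.length ∧ ∀ y, y < pattern.length →
        ((lawn.getD y []).length = (pattern.getD y []).length ∧
         ∀ x, x < (pattern.headD []).length →
           (pattern.getD y []).getD x 0 =
             pvClip (pvClip (gcell lawn y x) (rmaxP pattern y)) (cmaxP pattern x))) := by
  unfold can_mow_alt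
  by_cases hL : lawn.length = pattern.length
  · rw [if_neg (by simp [hL])]
    simp only [List.all_eq_true, List.mem_range, Bool.and_eq_true, beq_iff_eq]
    have hrm : ∀ y, y < pattern.length →
        (pattern.map (fun r => (PySem.List.max? r (fun v => v)).getD 0)).getD y 0 = rmaxP pattern y := by
      intro y hy
      rw [List.getD_eq_getElem _ _ (by simpa using hy), List.getElem_map, rmaxP,
        List.getD_eq_getElem _ _ hy]
    have hcm : ∀ x, x < (pattern.headD []).length →
        ((List.range (pattern.headD []).length).map (fun x =>
          (PySem.List.max? (pattern.map (fun r => r.getD x 0)) (fun v => v)).getD 0)).getD x 0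
          = cmaxP pattern x := by
      intro x hx
      exact PySem.List.getD_map_range _ _ _ _ hx
    constructor
    · intro hall
      refine ⟨hL, fun y hy => ?_⟩
      obtain ⟨hl1, hl2⟩ := hall y hy
      refine ⟨hl1, fun x hx => ?_⟩
      have hq := hl2 x hx
      rw [hrm y hy, hcm x hx] at hq
      exact hq
    · rintro ⟨hL', hall⟩ y hy
      obtain ⟨hl1, hl2⟩ := hall y hy
      refine ⟨hl1, fun x hx => ?_⟩
      rw [hrm y hy, hcm x hx]
      exact hl2 x hx
  · rw [if_pos hL]
    constructor
    · intro hq; simp at hq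
    · rintro ⟨hL', _⟩; exact absurd hL' hL

theorem can_mow_spec : Claim_equal_can_mow := by
  intro lawn pattern _ hpre
  obtain ⟨hne, hC, hrect, hdisj⟩ := hpre
  unfold Spec_can_mow
  -- the flattened pattern is nonempty, so max() returns its maximum M
  have hfne : pvFlatten pattern ≠ [] := by
    rcases pattern with _ | ⟨r0, rest⟩
    · exact absurd rfl hne
    · intro habs
      rw [pvFlatten, List.flatMap_cons] at habs
      rcases List.append_eq_nil_iff.mp habs with ⟨h1, _⟩
      rw [h1] at hC
      simp at hC
  obtain ⟨M, hM⟩ : ∃ M, PySem.List.max? (pvFlatten pattern) (fun v => v) = some M := by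
    rcases hf : pvFlatten pattern with _ | ⟨a, t⟩
    · exact absurd hf hfne
    · exact ⟨t.foldl max a, PySem.List.max?_id_cons _ _⟩
  have hAeq : can_mow lawn pattern =
      (((PySem.List.pyRange ((PySem.List.max? (pvFlatten pattern) (fun v => v)).getD 0) (-1) (-1)).foldl
        (fun L h => pvStep pattern h L) lawn) == pattern) := rfl
  have hMg : (PySem.List.max? (pvFlatten pattern) (fun v => v)).getD 0 = M := by rw [hM]; rfl
  set final := (PySem.List.pyRange M (-1) (-1)).foldl (fun L h => pvStep pattern h L) lawn with hfinal
  have hAeq2 : can_mow lawn pattern = (final == pattern) := by rw [hAeq, hMg]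
  have hrle : ∀ y, y < pattern.length → rmaxP pattern y ≤ M :=
    fun y hy => rmax_le_M pattern M hM hC hrect y hy
  have hcle : ∀ x, x < (pattern.headD []).length → cmaxP pattern x ≤ M :=
    fun x hx => cmax_le_M pattern M hM hne hC hrect x hx
  obtain ⟨H1, H2, hcell⟩ : final.length = lawn.length ∧
      (∀ y', (final.getD y' []).length = (lawn.getD y' []).length) ∧
      (∀ y x, y < pattern.length → x < (pattern.headD []).length →
        gcell final y x = pvClip (pvClip (gcell lawn y x) (rmaxP pattern y)) (cmaxP pattern x)) := by
    rcases (by omega : 0 ≤ M ∨ M < 0) with hM0 | hM0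
    · -- the heights loop is nonempty; it can only run when the lawn covers the pattern
      obtain ⟨hlen, hrow⟩ : pattern.length ≤ lawn.length ∧
          (∀ y ∈ List.range pattern.length, (pattern.headD []).length ≤ (lawn.getD y []).length) := by
        rcases hdisj with hallneg | hcover
        · exfalso
          have hmm := PySem.List.max?_mem hM
          simp only [pvFlatten, List.mem_flatMap] at hmm
          obtain ⟨r, hr, hv⟩ := hmm
          have := hallneg r hr M hv
          omega
        · exact hcover
      have hncast : (((M.toNat + 1 : Nat)) : Int) - 1 = M := by push_cast; omega
      obtain ⟨H1, H2, H3⟩ := heights_spec pattern hne hC hrect (M.toNat + 1) lawn hlen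
        (fun y hy => hrow y (List.mem_range.mpr hy))
      rw [hncast] at H1 H2 H3
      refine ⟨H1, H2, fun y x hy hx => ?_⟩
      rw [H3 y x hy hx]
      have h1 := hrle y hy
      have h2 := hcle x hx
      simp only [pvClip]
      split_ifs <;> omega
    · have hemp : PySem.List.pyRange M (-1) (-1) = [] := pyRange_down_empty M hM0
      rw [hfinal, hemp]
      refine ⟨rfl, fun _ => rfl, fun y x hy hx => ?_⟩
      have h1 := hrle y hy
      have h2 := hcle x hx
      simp only [List.foldl_nil, pvClip]
      split_ifs <;> omega
  rw [Bool.eq_iff_iff, hAeq2, beq_iff_eq, balt_iff lawn pattern]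
  constructor
  · intro hfp
    have hlen1 : lawn.length = pattern.length := by
      have hq := congrArg List.length hfp
      rw [H1] at hq
      exact hq
    refine ⟨hlen1, fun y hy => ?_⟩
    have hrowq : final.getD y [] = pattern.getD y [] := by rw [hfp]
    have hrl : (lawn.getD y []).length = (pattern.getD y []).length := by
      rw [← hrowq, H2]
    refine ⟨hrl, fun x hx => ?_⟩
    rw [← hcell y x hy hx, gcell, hrowq]
  · rintro ⟨hlen1, hall⟩
    apply List.ext_getElem (by rw [H1, hlen1])
    intro y hy1 hy2
    have hy : y < pattern.length := hy2
    obtain ⟨hrl, hcells⟩ := hall y hy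
    have hgetD : final.getD y [] = final[y] := List.getD_eq_getElem _ _ hy1
    have hgetDp : pattern.getD y [] = pattern[y] := List.getD_eq_getElem _ _ hy2
    have hClen : (pattern.getD y []).length = (pattern.headD []).length :=
      hrect _ (getD_mem_of_lt pattern y hy)
    apply List.ext_getElem
    · rw [← hgetD, ← hgetDp, H2, hrl]
    · intro x hx1 hx2
      have hx : x < (pattern.headD []).length := by
        rw [← hClen, hgetDp]
        exact hx2
      have h1 : final[y][x] = gcell final y x := by
        rw [gcell, hgetD, List.getD_eq_getElem _ _ hx1]
      have h2 : pattern[y][x] = (pattern.getD y []).getD x 0 := by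
        rw [hgetDp, List.getD_eq_getElem _ _ hx2]
      rw [h1, h2, hcell y x hy hx, hcells x hx]
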